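-- pv_equiv track=rewrite | github.com/HengyueGao/FPGA-Par | FPGA-Par.py | getClustersAdjHash
-- ===== SOURCE A (Python) =====
-- def getClustersAdjHash(mapping_arr,adj_hash):
--     clusters_hash = {}
--     for node_no,cluster_no in enumerate(mapping_arr):
--         if(cluster_no not in clusters_hash): clusters_hash[cluster_no] = {}
--         for adj_node,edge_weight in adj_hash[node_no].items():
--             adj_cluster = mapping_arr[adj_node]
--             if(adj_cluster == cluster_no): continue
--             if(adj_cluster not in clusters_hash[cluster_no]): clusters_hash[cluster_no][adj_cluster] = 0
--             clusters_hash[cluster_no][adj_cluster] += edge_weight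
--     return clusters_hash
-- ===== SOURCE B (Python) =====
-- def getClustersAdjHash(mapping_arr, adj_hash):
--     # Pipeline: flatten the graph to (cluster, adj_cluster, weight) triples, aggregate
--     # them into a flat dict keyed by the cluster pair, then regroup into nested dicts.
--     triples = [(cluster_no, mapping_arr[adj_node], edge_weight)
--                for node_no, cluster_no in enumerate(mapping_arr)
--                for adj_node, edge_weight in adj_hash[node_no].items()]
--     totals = {}
--     for c, ac, w in triples:
--         if ac != c:
--             totals[(c, ac)] = totals.get((c, ac), 0) + w
--     out = {c: {} for c in mapping_arr}
--     for (c, ac), w in totals.items():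
--         out[c][ac] = w
--     return out
-- ===== Notes on version B (the rewrite author's own statement) =====
-- stated objective: alternative
-- what changed: Replaces A's in-place nested-dict accumulation during a single graph traversal by a three-stage pipeline: flatten the graph to (cluster, adj_cluster, weight) triples, aggregate them into one flat dict keyed by the cluster PAIR, then regroup that flat counter into the nested dict shape over a base of empty per-cluster dicts.
import Mathlib
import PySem

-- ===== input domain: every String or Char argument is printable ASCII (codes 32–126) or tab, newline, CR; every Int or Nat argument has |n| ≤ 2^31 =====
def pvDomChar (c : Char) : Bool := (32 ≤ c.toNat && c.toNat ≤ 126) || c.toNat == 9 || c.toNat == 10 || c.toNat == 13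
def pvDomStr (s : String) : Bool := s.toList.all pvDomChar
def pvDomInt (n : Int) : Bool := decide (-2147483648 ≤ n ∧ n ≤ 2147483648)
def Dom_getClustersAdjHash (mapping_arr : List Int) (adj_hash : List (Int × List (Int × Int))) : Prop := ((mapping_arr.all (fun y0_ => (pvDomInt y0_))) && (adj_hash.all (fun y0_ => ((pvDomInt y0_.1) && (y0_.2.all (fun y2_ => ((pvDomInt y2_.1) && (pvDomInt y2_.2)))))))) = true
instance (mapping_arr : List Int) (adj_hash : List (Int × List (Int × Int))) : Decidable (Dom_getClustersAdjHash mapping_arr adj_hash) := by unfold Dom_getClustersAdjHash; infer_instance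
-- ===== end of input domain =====

-- B replaces A's in-place nested-dict accumulation by a three-stage pipeline (flatten to
-- (cluster, adj_cluster, weight) triples, aggregate into a flat pair-keyed dict, regroup
-- into nested dicts) — objective: alternative.


-- ===== PORT A =====
-- inner-loop body of A: two steps, 'if adj_cluster not in …: … = 0' then '+= edge_weight'
def pvA_edge (m : List Int) (c : Int) (D : PySem.Dict Int (PySem.Dict Int Int))
    (aw : Int × Int) : PySem.Dict Int (PySem.Dict Int Int) :=
  let ac := PySem.List.pyGetD m aw.1 0
  if ac == c then D
  else
    let D1 := if (D.getD c ⟨[]⟩).contains ac then D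
              else D.insert c ((D.getD c ⟨[]⟩).insert ac 0)
    D1.insert c ((D1.getD c ⟨[]⟩).insert ac ((D1.getD c ⟨[]⟩).getD ac 0 + aw.2))

-- outer-loop body of A: create the cluster key if absent, then run the inner loop
def pvA_node (m : List Int) (adj : List (Int × List (Int × Int)))
    (D : PySem.Dict Int (PySem.Dict Int Int)) (p : Int × Int) : PySem.Dict Int (PySem.Dict Int Int) :=
  let D0 := if D.contains p.2 then D else D.insert p.2 ⟨[]⟩
  (PySem.Dict.getD (⟨adj⟩ : PySem.Dict Int (List (Int × Int))) p.1 []).foldl (pvA_edge m p.2) D0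

def getClustersAdjHash (mapping_arr : List Int) (adj_hash : List (Int × List (Int × Int))) : List (Int × List (Int × Int)) :=
  ((PySem.List.enumerate mapping_arr).foldl (pvA_node mapping_arr adj_hash) ⟨[]⟩).items.map
    (fun p => (p.1, p.2.items))

-- ===== PORT B =====
-- the triples comprehension: [(cluster_no, mapping_arr[adj_node], edge_weight) for … for …]
def pvB_triples (m : List Int) (adj : List (Int × List (Int × Int))) : List (Int × Int × Int) :=
  (PySem.List.enumerate m).flatMap (fun p =>
    (PySem.Dict.getD (⟨adj⟩ : PySem.Dict Int (List (Int × Int))) p.1 []).map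
      (fun aw => (p.2, PySem.List.pyGetD m aw.1 0, aw.2)))

-- aggregation loop body: totals[(c, ac)] = totals.get((c, ac), 0) + w, skipping ac == c
def pvB_bump (T : PySem.Dict (Int × Int) Int) (t : Int × Int × Int) : PySem.Dict (Int × Int) Int :=
  if t.2.1 == t.1 then T
  else T.insert (t.1, t.2.1) (T.getD (t.1, t.2.1) 0 + t.2.2)

-- regrouping loop body: out[c][ac] = w
def pvB_graftStep (out : PySem.Dict Int (PySem.Dict Int Int)) (q : (Int × Int) × Int) :
    PySem.Dict Int (PySem.Dict Int Int) :=
  out.insert q.1.1 ((out.getD q.1.1 ⟨[]⟩).insert q.1.2 q.2)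

def getClustersAdjHash_alt (mapping_arr : List Int) (adj_hash : List (Int × List (Int × Int))) : List (Int × List (Int × Int)) :=
  let totals := (pvB_triples mapping_arr adj_hash).foldl pvB_bump ⟨[]⟩
  let base := mapping_arr.foldl (fun D c => D.insert c ⟨[]⟩) (⟨[]⟩ : PySem.Dict Int (PySem.Dict Int Int))
  (totals.items.foldl pvB_graftStep base).items.map (fun p => (p.1, p.2.items))

-- ===== PRECONDITION & SPEC =====
-- Pre_ excludes exactly the inputs where A raises: a node index missing from adj_hash
-- (KeyError) or an adjacent node index out of range for mapping_arr (IndexError).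
def Pre_getClustersAdjHash (mapping_arr : List Int) (adj_hash : List (Int × List (Int × Int))) : Prop :=
  ∀ p ∈ PySem.List.enumerate mapping_arr,
    (PySem.Dict.get? (⟨adj_hash⟩ : PySem.Dict Int (List (Int × Int))) p.1).isSome = true ∧
    ∀ aw ∈ PySem.Dict.getD (⟨adj_hash⟩ : PySem.Dict Int (List (Int × Int))) p.1 [],
      PySem.Raise.InRange mapping_arr.length aw.1
instance (mapping_arr : List Int) (adj_hash : List (Int × List (Int × Int))) : Decidable (Pre_getClustersAdjHash mapping_arr adj_hash) := by unfold Pre_getClustersAdjHash; infer_instance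

def pvWitness_getClustersAdjHash : List Int × (List (Int × List (Int × Int))) :=
  ([0, 1, 0], [(0, [(1, 5)]), (1, [(0, 5), (2, 2)]), (2, [(1, 2)])])

def Spec_getClustersAdjHash (mapping_arr : List Int) (adj_hash : List (Int × List (Int × Int))) (out : List (Int × List (Int × Int))) : Prop := out = getClustersAdjHash_alt mapping_arr adj_hash
instance (mapping_arr : List Int) (adj_hash : List (Int × List (Int × Int))) (out : List (Int × List (Int × Int))) : Decidable (Spec_getClustersAdjHash mapping_arr adj_hash out) := by unfold Spec_getClustersAdjHash; infer_instance

-- ===== CLAIM (what is proved, stated in full; the proofs are below) =====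
def Claim_equal_getClustersAdjHash : Prop := ∀ (mapping_arr : List Int) (adj_hash : List (Int × List (Int × Int))), Dom_getClustersAdjHash mapping_arr adj_hash → Pre_getClustersAdjHash mapping_arr adj_hash → Spec_getClustersAdjHash mapping_arr adj_hash (getClustersAdjHash mapping_arr adj_hash)

-- ===== LEMMAS AND PROOFS =====

-- A's accumulate step, decomposed for the proof: the 'setdefault' part and the merged edge update
def pvB_sd (D : PySem.Dict Int (PySem.Dict Int Int)) (c : Int) : PySem.Dict Int (PySem.Dict Int Int) :=
  if D.contains c then D else D.insert c ⟨[]⟩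

def pvB_edge (m : List Int) (c : Int) (D : PySem.Dict Int (PySem.Dict Int Int))
    (aw : Int × Int) : PySem.Dict Int (PySem.Dict Int Int) :=
  let ac := PySem.List.pyGetD m aw.1 0
  if ac == c then D
  else D.insert c ((D.getD c ⟨[]⟩).insert ac ((D.getD c ⟨[]⟩).getD ac 0 + aw.2))

def pvB_node (m : List Int) (adj : List (Int × List (Int × Int)))
    (D : PySem.Dict Int (PySem.Dict Int Int)) (p : Int × Int) : PySem.Dict Int (PySem.Dict Int Int) :=
  (PySem.Dict.getD (⟨adj⟩ : PySem.Dict Int (List (Int × Int))) p.1 []).foldl (pvB_edge m p.2) D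

-- the nested accumulate step, phrased over a triple (c, ac, w)
def pvNStep (G : PySem.Dict Int (PySem.Dict Int Int)) (t : Int × Int × Int) :
    PySem.Dict Int (PySem.Dict Int Int) :=
  if t.2.1 == t.1 then G
  else G.insert t.1 ((G.getD t.1 ⟨[]⟩).insert t.2.1 ((G.getD t.1 ⟨[]⟩).getD t.2.1 0 + t.2.2))

-- regrouping a flat pair list onto a base dict
def pvGraft (D0 : PySem.Dict Int (PySem.Dict Int Int)) (L : List ((Int × Int) × Int)) :
    PySem.Dict Int (PySem.Dict Int Int) :=
  L.foldl pvB_graftStep D0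

theorem pv_contains_ne {ν : Type} (d : PySem.Dict Int ν) {k k' : Int}
    (hk : d.contains k = true) (hk' : d.contains k' = false) : k ≠ k' := by
  intro h; rw [h, hk'] at hk; exact absurd hk (by simp)

theorem pv_insert_comm {ν : Type} (d : PySem.Dict Int ν) (k k' : Int) (v v' : ν)
    (hk : d.contains k = true) (hk' : d.contains k' = false) :
    (d.insert k' v').insert k v = (d.insert k v).insert k' v' := by
  have hne : k ≠ k' := pv_contains_ne d hk hk'
  obtain ⟨xs⟩ := d
  have e1 : (PySem.Dict.mk xs).insert k' v' = ⟨xs ++ [(k', v')]⟩ := by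
    simp only [PySem.Dict.insert]
    rw [if_neg (by simp [hk'])]
  have e2 : (PySem.Dict.mk xs).insert k v
      = ⟨xs.map (fun p => if (p.1 == k) = true then (k, v) else p)⟩ := by
    simp only [PySem.Dict.insert]
    rw [if_pos (by simpa using hk)]
  rw [e1, e2]
  have c1 : (PySem.Dict.mk (xs ++ [(k', v')])).contains k = true := by
    simp only [PySem.Dict.contains, List.any_append]
    simp only [PySem.Dict.contains] at hk
    simp [hk]
  have c2 : (PySem.Dict.mk (xs.map (fun p => if (p.1 == k) = true then (k, v) else p))).contains k' = false := by
    simp only [PySem.Dict.contains, List.any_map, List.any_eq_false]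
    have hall : ∀ (a : Int) (b : ν), (a, b) ∈ xs → ¬ a = k' := by
      simpa [PySem.Dict.contains] using hk'
    rintro ⟨a, b⟩ hp
    by_cases h : a = k
    · simp only [h]
      simp [beq_iff_eq]
      exact hne
    · simp [Function.comp, h, beq_iff_eq, hall a b hp]
  have e3 : (PySem.Dict.mk (xs ++ [(k', v')])).insert k v
      = ⟨(xs ++ [(k', v')]).map (fun p => if (p.1 == k) = true then (k, v) else p)⟩ := by
    simp only [PySem.Dict.insert]
    rw [if_pos c1]
  have e4 : (PySem.Dict.mk (xs.map (fun p => if (p.1 == k) = true then (k, v) else p))).insert k' v'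
      = ⟨xs.map (fun p => if (p.1 == k) = true then (k, v) else p) ++ [(k', v')]⟩ := by
    simp only [PySem.Dict.insert]
    rw [if_neg (by rw [c2]; simp)]
  rw [e3, e4]
  congr 1
  simp [beq_iff_eq, Ne.symm hne]

-- structural insert commutation when the first key is already present (items lists equal)
theorem pv_insert_comm_present {ν : Type} (d : PySem.Dict Int ν) (k k' : Int) (v v' : ν)
    (hk : d.contains k = true) (hne : k ≠ k') :
    (d.insert k' v').insert k v = (d.insert k v).insert k' v' := by
  by_cases hk' : d.contains k' = true
  · apply PySem.Dict.ext
    have ck : (d.insert k' v').contains k = true := by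
      rw [PySem.Dict.contains_insert]; simp [hk]
    have ck' : (d.insert k v).contains k' = true := by
      rw [PySem.Dict.contains_insert]; simp [hk']
    rw [PySem.Dict.items_insert_of_contains _ _ ck,
        PySem.Dict.items_insert_of_contains _ _ hk',
        PySem.Dict.items_insert_of_contains _ _ ck',
        PySem.Dict.items_insert_of_contains _ _ hk]
    rw [List.map_map, List.map_map]
    apply List.map_congr_left
    intro p _
    by_cases h1 : p.1 = k'
    · simp [Function.comp, h1, Ne.symm hne]
    · by_cases h2 : p.1 = k
      · simp [Function.comp, h2, hne]
      · simp [Function.comp, h1, h2]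
  · rw [Bool.not_eq_true] at hk'
    exact pv_insert_comm d k k' v v' hk hk'

-- A's two-step inner body equals the merged inner body
theorem pv_edge_eq (m : List Int) (c : Int) : pvA_edge m c = pvB_edge m c := by
  funext D aw
  unfold pvA_edge pvB_edge
  by_cases h0 : (PySem.List.pyGetD m aw.1 0 == c) = true
  · simp [h0]
  · rw [Bool.not_eq_true] at h0
    by_cases h1 : ((D.getD c ⟨[]⟩).contains (PySem.List.pyGetD m aw.1 0)) = true
    · simp [h0, h1]
    · rw [Bool.not_eq_true] at h1
      simp [h0, h1, PySem.Dict.insert_insert_self,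
        PySem.Dict.getD_of_not_contains _ _ h1]

-- pvB_edge at a present outer key c preserves the key set
theorem pv_contains_edge (m : List Int) (c x : Int) (D : PySem.Dict Int (PySem.Dict Int Int))
    (aw : Int × Int) (hc : D.contains c = true) :
    (pvB_edge m c D aw).contains x = D.contains x := by
  unfold pvB_edge
  by_cases h0 : (PySem.List.pyGetD m aw.1 0 == c) = true
  · simp [h0]
  · rw [Bool.not_eq_true] at h0
    simp only [h0, Bool.false_eq_true, if_false, PySem.Dict.contains_insert]
    by_cases hx : x = c
    · simp [hx, hc]
    · simp [hx]

theorem pv_contains_sd_self (D : PySem.Dict Int (PySem.Dict Int Int)) (c : Int) :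
    (pvB_sd D c).contains c = true := by
  unfold pvB_sd
  by_cases h : D.contains c = true
  · simp [h]
  · rw [Bool.not_eq_true] at h
    simp [h]

theorem pv_contains_sd_mono (D : PySem.Dict Int (PySem.Dict Int Int)) (c x : Int)
    (h : D.contains x = true) : (pvB_sd D c).contains x = true := by
  unfold pvB_sd
  by_cases hc : D.contains c = true
  · simp [hc, h]
  · rw [Bool.not_eq_true] at hc
    simp [hc, PySem.Dict.contains_insert, h]

-- one setdefault commutes with one edge update at a present key
theorem pv_comm1 (m : List Int) (c c' : Int) (D : PySem.Dict Int (PySem.Dict Int Int))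
    (aw : Int × Int) (hc : D.contains c = true) :
    pvB_sd (pvB_edge m c D aw) c' = pvB_edge m c (pvB_sd D c') aw := by
  by_cases h' : D.contains c' = true
  · have h1 : (pvB_edge m c D aw).contains c' = true := by
      rw [pv_contains_edge m c c' D aw hc]; exact h'
    unfold pvB_sd
    simp [h1, h']
  · rw [Bool.not_eq_true] at h'
    have hcc' : c ≠ c' := pv_contains_ne D hc h'
    have h1 : (pvB_edge m c D aw).contains c' = false := by
      rw [pv_contains_edge m c c' D aw hc]; exact h'
    unfold pvB_sd
    simp only [h1, h', Bool.false_eq_true, if_false]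
    unfold pvB_edge
    by_cases h0 : (PySem.List.pyGetD m aw.1 0 == c) = true
    · simp [h0]
    · rw [Bool.not_eq_true] at h0
      simp only [h0, Bool.false_eq_true, if_false]
      rw [PySem.Dict.getD_insert_of_ne _ _ _ hcc']
      exact (pv_insert_comm D c c' _ _ hc h').symm

-- one setdefault commutes with a whole inner edge fold
theorem pv_comm_es (m : List Int) (c c' : Int) (es : List (Int × Int))
    (D : PySem.Dict Int (PySem.Dict Int Int)) (hc : D.contains c = true) :
    pvB_sd (es.foldl (pvB_edge m c) D) c' = es.foldl (pvB_edge m c) (pvB_sd D c') := by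
  induction es generalizing D with
  | nil => rfl
  | cons e es ih =>
    simp only [List.foldl_cons]
    rw [ih _ (by rw [pv_contains_edge m c c D e hc]; exact hc),
      pv_comm1 m c c' D e hc]

-- a run of setdefaults commutes with a whole inner edge fold
theorem pv_comm_sds (m : List Int) (c : Int) (l : List Int) (es : List (Int × Int))
    (D : PySem.Dict Int (PySem.Dict Int Int)) (hc : D.contains c = true) :
    l.foldl pvB_sd (es.foldl (pvB_edge m c) D) = es.foldl (pvB_edge m c) (l.foldl pvB_sd D) := by
  induction l generalizing D with
  | nil => rfl
  | cons a l ih =>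
    simp only [List.foldl_cons]
    rw [pv_comm_es m c a es D hc, ih _ (pv_contains_sd_mono D a c hc)]

theorem pv_enumerate_map_snd (m : List Int) (s : Int) :
    (PySem.List.enumerate m s).map (·.2) = m := by
  induction m generalizing s with
  | nil => rfl
  | cons a m ih => simp [PySem.List.enumerate, ih]

-- A's interleaved fold = setdefault pass then accumulate pass
theorem pv_main (m : List Int) (adj : List (Int × List (Int × Int)))
    (l : List (Int × Int)) (D : PySem.Dict Int (PySem.Dict Int Int)) :
    l.foldl (pvA_node m adj) D
      = l.foldl (pvB_node m adj) ((l.map (·.2)).foldl pvB_sd D) := by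
  induction l generalizing D with
  | nil => rfl
  | cons p l ih =>
    simp only [List.foldl_cons, List.map_cons]
    rw [ih]
    unfold pvA_node pvB_node
    rw [pv_edge_eq m p.2]
    rw [show (if D.contains p.2 then D else D.insert p.2 ⟨[]⟩) = pvB_sd D p.2 from rfl]
    rw [pv_comm_sds m p.2 (l.map (·.2)) _ (pvB_sd D p.2) (pv_contains_sd_self D p.2)]

-- the accumulate pass over nodes/edges is the pvNStep fold over the flattened triples
theorem pv_nodes_eq_triples (m : List Int) (adj : List (Int × List (Int × Int)))
    (l : List (Int × Int)) (G : PySem.Dict Int (PySem.Dict Int Int)) :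
    l.foldl (pvB_node m adj) G
      = (l.flatMap (fun p =>
          (PySem.Dict.getD (⟨adj⟩ : PySem.Dict Int (List (Int × Int))) p.1 []).map
            (fun aw => (p.2, PySem.List.pyGetD m aw.1 0, aw.2)))).foldl pvNStep G := by
  induction l generalizing G with
  | nil => rfl
  | cons p l ih =>
    simp only [List.foldl_cons, List.flatMap_cons, List.foldl_append]
    rw [← ih]
    congr 1
    rw [List.foldl_map]
    rfl

-- B's base dict (comprehension, unconditional insert of {}) equals the setdefault fold
theorem pv_base_eq (m : List Int) (D : PySem.Dict Int (PySem.Dict Int Int))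
    (h : ∀ p ∈ D.items, p.2 = (⟨[]⟩ : PySem.Dict Int Int)) :
    m.foldl (fun D c => D.insert c ⟨[]⟩) D = m.foldl pvB_sd D := by
  induction m generalizing D with
  | nil => rfl
  | cons a m ih =>
    simp only [List.foldl_cons]
    have hstep : D.insert a ⟨[]⟩ = pvB_sd D a := by
      unfold pvB_sd
      by_cases hc : D.contains a = true
      · rw [if_pos hc]
        apply PySem.Dict.ext
        rw [PySem.Dict.items_insert_of_contains _ _ hc]
        conv_rhs => rw [← List.map_id D.items]
        apply List.map_congr_left
        intro p hp
        by_cases h1 : p.1 = a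
        · have := h p hp
          simp [h1, ← this, Prod.ext_iff]
        · simp [h1]
      · rw [Bool.not_eq_true] at hc
        rw [if_neg (by simp [hc])]
    rw [hstep]
    apply ih
    intro p hp
    unfold pvB_sd at hp
    by_cases hc : D.contains a = true
    · rw [if_pos hc] at hp; exact h p hp
    · rw [Bool.not_eq_true] at hc
      rw [if_neg (by simp [hc])] at hp
      rcases (PySem.Dict.mem_items_insert _ _ _ _).mp hp with h1 | h2
      · rw [h1]
      · exact h p h2.1

-- all values of the setdefault fold are empty dicts
theorem pv_sd_vals_empty (m : List Int) (D : PySem.Dict Int (PySem.Dict Int Int))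
    (h : ∀ p ∈ D.items, p.2 = (⟨[]⟩ : PySem.Dict Int Int)) :
    ∀ p ∈ (m.foldl pvB_sd D).items, p.2 = (⟨[]⟩ : PySem.Dict Int Int) := by
  induction m generalizing D with
  | nil => exact h
  | cons a m ih =>
    simp only [List.foldl_cons]
    apply ih
    intro p hp
    unfold pvB_sd at hp
    by_cases hc : D.contains a = true
    · rw [if_pos hc] at hp; exact h p hp
    · rw [Bool.not_eq_true] at hc
      rw [if_neg (by simp [hc])] at hp
      rcases (PySem.Dict.mem_items_insert _ _ _ _).mp hp with h1 | h2
      · rw [h1]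
      · exact h p h2.1

theorem pv_getD_empty (D : PySem.Dict Int (PySem.Dict Int Int))
    (h : ∀ p ∈ D.items, p.2 = (⟨[]⟩ : PySem.Dict Int Int)) (c : Int) :
    D.getD c (⟨[]⟩ : PySem.Dict Int Int) = ⟨[]⟩ := by
  rw [PySem.Dict.getD_eq_get?_getD]
  cases hg : D.get? c with
  | none => rfl
  | some v =>
    have := h (c, v) (PySem.Dict.mem_items_of_get?_eq_some _ hg)
    simpa using this

-- the setdefault fold contains every element of the list
theorem pv_sd_contains (m : List Int) (D : PySem.Dict Int (PySem.Dict Int Int)) (c : Int)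
    (h : c ∈ m ∨ D.contains c = true) : (m.foldl pvB_sd D).contains c = true := by
  induction m generalizing D with
  | nil =>
    rcases h with h | h
    · cases h
    · exact h
  | cons a m ih =>
    simp only [List.foldl_cons]
    rcases h with h | h
    · rcases List.mem_cons.mp h with rfl | h2
      · exact ih _ (Or.inr (pv_contains_sd_self D c))
      · exact ih _ (Or.inl h2)
    · exact ih _ (Or.inr (pv_contains_sd_mono D a c h))

-- grafting preserves outer-key membership
theorem pv_graft_contains_mono (L : List ((Int × Int) × Int))
    (D0 : PySem.Dict Int (PySem.Dict Int Int)) (x : Int) (h : D0.contains x = true) :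
    (pvGraft D0 L).contains x = true := by
  induction L generalizing D0 with
  | nil => exact h
  | cons q L ih =>
    simp only [pvGraft, List.foldl_cons]
    apply ih
    unfold pvB_graftStep
    rw [PySem.Dict.contains_insert]
    simp [h]

-- first-match lookup through an appended final entry
theorem pv_get?_append_of_isSome {κ ν : Type} [BEq κ] (L : List (κ × ν)) (k : κ) (e : κ × ν)
    (v : ν) (h : (PySem.Dict.mk L).get? k = some v) :
    (PySem.Dict.mk (L ++ [e])).get? k = some v := by
  obtain ⟨e1, e2⟩ := e
  induction L with
  | nil => simp [PySem.Dict.get?] at h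
  | cons a L ih =>
    rw [List.cons_append, PySem.Dict.get?_mk_cons] at *
    by_cases hb : (a.1 == k) = true
    · simpa [hb] using h
    · rw [Bool.not_eq_true] at hb
      simp only [hb, Bool.false_eq_true, if_false] at h ⊢
      exact ih h

theorem pv_get?_append_of_none {κ ν : Type} [BEq κ] (L : List (κ × ν)) (k : κ) (e : κ × ν)
    (h : (PySem.Dict.mk L).get? k = none) :
    (PySem.Dict.mk (L ++ [e])).get? k = if (e.1 == k) = true then some e.2 else none := by
  obtain ⟨e1, e2⟩ := e
  induction L with
  | nil =>
    rw [List.nil_append, PySem.Dict.get?_mk_cons]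
    rfl
  | cons a L ih =>
    rw [List.cons_append, PySem.Dict.get?_mk_cons] at *
    by_cases hb : (a.1 == k) = true
    · simp [hb] at h
    · rw [Bool.not_eq_true] at hb
      simp only [hb, Bool.false_eq_true, if_false] at h ⊢
      exact ih h

-- characterization: inner lookup in the grafted dict is lookup in the flat pair dict
theorem pv_graft_get? (L : List ((Int × Int) × Int))
    (D0 : PySem.Dict Int (PySem.Dict Int Int))
    (hnd : (L.map (·.1)).Nodup)
    (H0 : ∀ c ac : Int, ((D0.getD c ⟨[]⟩).contains ac) = false) (c ac : Int) :
    ((pvGraft D0 L).getD c ⟨[]⟩).get? ac = (PySem.Dict.mk L).get? (c, ac) := by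
  induction L using List.reverseRecOn with
  | nil =>
    have h := H0 c ac
    rw [PySem.Dict.contains_eq_isSome_get?] at h
    cases hg : (D0.getD c ⟨[]⟩).get? ac with
    | none =>
      rw [show pvGraft D0 [] = D0 from rfl, hg]
      simp [PySem.Dict.get?]
    | some v => rw [hg] at h; simp at h
  | append_singleton L' e ih =>
    obtain ⟨⟨c', ac'⟩, v'⟩ := e
    have hnd2 : (L'.map (·.1)).Nodup ∧ (c', ac') ∉ L'.map (·.1) := by
      rw [List.map_append] at hnd
      rcases List.nodup_append.mp hnd with ⟨h1, _, h3⟩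
      exact ⟨h1, fun hm => h3 _ hm _ (by simp) rfl⟩
    have hG : pvGraft D0 (L' ++ [((c', ac'), v')]) =
        pvB_graftStep (pvGraft D0 L') ((c', ac'), v') := by
      simp [pvGraft, List.foldl_append]
    rw [hG]
    by_cases hkey : (c', ac') = (c, ac)
    · obtain ⟨rfl, rfl⟩ := Prod.mk.injEq .. ▸ hkey
      have hnone : (PySem.Dict.mk L').get? (c', ac') = none := by
        rw [PySem.Dict.get?_eq_none_iff_not_mem_keys]
        simpa [PySem.Dict.keys] using hnd2.2
      rw [pv_get?_append_of_none L' (c', ac') ((c', ac'), v') hnone]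
      unfold pvB_graftStep
      dsimp only
      rw [PySem.Dict.getD_insert_self, PySem.Dict.get?_insert_self]
      simp
    · have hR : (PySem.Dict.mk (L' ++ [((c', ac'), v')])).get? (c, ac)
          = (PySem.Dict.mk L').get? (c, ac) := by
        cases hg : (PySem.Dict.mk L').get? (c, ac) with
        | some v => exact pv_get?_append_of_isSome L' (c, ac) ((c', ac'), v') v hg
        | none =>
          rw [pv_get?_append_of_none L' (c, ac) ((c', ac'), v') hg]
          simp [hkey]
      rw [hR, ← ih hnd2.1]
      unfold pvB_graftStep
      dsimp only
      by_cases hc : c = c'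
      · subst hc
        have hac : ac ≠ ac' := by
          intro h; exact hkey (by rw [h])
        rw [PySem.Dict.getD_insert_self, PySem.Dict.get?_insert_of_ne _ _ hac]
      · rw [PySem.Dict.getD_insert_of_ne _ _ _ hc]

theorem pv_graft_inner_contains (L : List ((Int × Int) × Int))
    (D0 : PySem.Dict Int (PySem.Dict Int Int))
    (hnd : (L.map (·.1)).Nodup)
    (H0 : ∀ c ac : Int, ((D0.getD c ⟨[]⟩).contains ac) = false) (c ac : Int) :
    ((pvGraft D0 L).getD c ⟨[]⟩).contains ac = (PySem.Dict.mk L).contains (c, ac) := by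
  rw [PySem.Dict.contains_eq_isSome_get?, PySem.Dict.contains_eq_isSome_get?,
    pv_graft_get? L D0 hnd H0 c ac]

theorem pv_graft_inner_getD (L : List ((Int × Int) × Int))
    (D0 : PySem.Dict Int (PySem.Dict Int Int))
    (hnd : (L.map (·.1)).Nodup)
    (H0 : ∀ c ac : Int, ((D0.getD c ⟨[]⟩).contains ac) = false) (c ac : Int) :
    ((pvGraft D0 L).getD c ⟨[]⟩).getD ac 0 = (PySem.Dict.mk L).getD (c, ac) 0 := by
  have h := pv_graft_get? L D0 hnd H0 c ac
  rw [PySem.Dict.getD_eq_get?_getD ((pvGraft D0 L).getD c ⟨[]⟩) ac 0, h,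
    PySem.Dict.getD_eq_get?_getD (PySem.Dict.mk L) (c, ac) 0]

-- grafting an in-place value replacement = one nested insert into the grafted dict
theorem pv_graft_rep (L : List ((Int × Int) × Int))
    (D0 : PySem.Dict Int (PySem.Dict Int Int))
    (hnd : (L.map (·.1)).Nodup)
    (H0 : ∀ c ac : Int, ((D0.getD c ⟨[]⟩).contains ac) = false)
    (hT : ∀ q ∈ L, D0.contains q.1.1 = true) (c ac : Int) (u : Int)
    (hmem : (c, ac) ∈ L.map (·.1)) :
    pvGraft D0 (L.map (fun p => if (p.1 == (c, ac)) = true then ((c, ac), u) else p))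
      = (pvGraft D0 L).insert c (((pvGraft D0 L).getD c ⟨[]⟩).insert ac u) := by
  induction L using List.reverseRecOn with
  | nil => simp at hmem
  | append_singleton L' e ih =>
    obtain ⟨⟨c', ac'⟩, v'⟩ := e
    have hnd2 : (L'.map (·.1)).Nodup ∧ (c', ac') ∉ L'.map (·.1) := by
      rw [List.map_append] at hnd
      rcases List.nodup_append.mp hnd with ⟨h1, _, h3⟩
      exact ⟨h1, fun hm => h3 _ hm _ (by simp) rfl⟩
    have hT2 : ∀ q ∈ L', D0.contains q.1.1 = true := fun q hq => hT q (by simp [hq])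
    have hGapp : ∀ (M : List ((Int × Int) × Int)) (f : (Int × Int) × Int),
        pvGraft D0 (M ++ [f]) = pvB_graftStep (pvGraft D0 M) f := by
      intro M f; simp [pvGraft, List.foldl_append]
    rw [List.map_append, List.map_singleton, hGapp, hGapp]
    by_cases hkey : ((c', ac') : Int × Int) = (c, ac)
    · obtain ⟨rfl, rfl⟩ := Prod.mk.injEq .. ▸ hkey
      have hmapid : L'.map (fun p => if (p.1 == ((c' : Int), (ac' : Int))) = true then ((c', ac'), u) else p) = L' := by
        apply List.map_congr_left ?_ |>.trans (List.map_id L')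
        intro p hp
        have : p.1 ≠ (c', ac') := fun h => hnd2.2 (h ▸ List.mem_map_of_mem hp)
        simp [this]
      rw [hmapid]
      unfold pvB_graftStep
      dsimp only
      rw [if_pos (by simp)]
      dsimp only
      rw [PySem.Dict.getD_insert_self, PySem.Dict.insert_insert_self,
        PySem.Dict.insert_insert_self]
    · have hmem2 : ((c, ac) : Int × Int) ∈ L'.map (·.1) := by
        rcases List.mem_map.mp hmem with ⟨q, hq, hq1⟩
        rcases List.mem_append.mp hq with hq' | hq'
        · exact hq1 ▸ List.mem_map_of_mem hq'
        · exfalso; simp at hq'; exact hkey (by rw [hq'] at hq1; simpa using hq1)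
      have ihe := ih hnd2.1 hT2 hmem2
      rw [show (if ((((c', ac'), v') : (Int × Int) × Int).1 == (c, ac)) = true
            then (((c, ac) : Int × Int), u) else ((c', ac'), v')) = ((c', ac'), v') from by
          simp [hkey]]
      rw [ihe]
      set G := pvGraft D0 L' with hGdef
      have hJc : (G.getD c ⟨[]⟩).contains ac = true := by
        rw [pv_graft_inner_contains L' D0 hnd2.1 H0 c ac]
        rw [PySem.Dict.contains_iff_mem_keys]
        simpa [PySem.Dict.keys] using hmem2
      have hGc : G.contains c = true := by
        apply pv_graft_contains_mono
        rcases List.mem_map.mp hmem2 with ⟨q, hq, hq1⟩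
        have := hT2 q hq
        rwa [show q.1.1 = c from by rw [hq1]] at this
      unfold pvB_graftStep
      dsimp only
      by_cases hc : c' = c
      · subst hc
        have hac : ac' ≠ ac := fun h => hkey (by rw [h])
        rw [PySem.Dict.getD_insert_self, PySem.Dict.insert_insert_self,
          PySem.Dict.getD_insert_self, PySem.Dict.insert_insert_self]
        congr 1
        exact (pv_insert_comm_present (G.getD c' ⟨[]⟩) ac ac' u v' hJc
          (fun h => hac h.symm)).symm
      · rw [PySem.Dict.getD_insert_of_ne _ _ _ hc,
          PySem.Dict.getD_insert_of_ne _ _ _ (fun h => hc h.symm)]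
        exact (pv_insert_comm_present G c c' ((G.getD c ⟨[]⟩).insert ac u)
          ((G.getD c' ⟨[]⟩).insert ac' v') hGc (fun h => hc h.symm)).symm

-- one flat bump under graft = one nested accumulate step
theorem pv_graft_bump (D0 : PySem.Dict Int (PySem.Dict Int Int))
    (T : PySem.Dict (Int × Int) Int)
    (hnd : T.keys.Nodup)
    (H0 : ∀ c ac : Int, ((D0.getD c ⟨[]⟩).contains ac) = false)
    (hT : ∀ q ∈ T.items, D0.contains q.1.1 = true) (c ac w : Int) :
    pvGraft D0 (T.insert (c, ac) (T.getD (c, ac) 0 + w)).items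
      = (pvGraft D0 T.items).insert c
          (((pvGraft D0 T.items).getD c ⟨[]⟩).insert ac
            (((pvGraft D0 T.items).getD c ⟨[]⟩).getD ac 0 + w)) := by
  have hndL : (T.items.map (·.1)).Nodup := by
    simpa [PySem.Dict.keys] using hnd
  have hval : ((pvGraft D0 T.items).getD c ⟨[]⟩).getD ac 0 = T.getD (c, ac) 0 := by
    rw [pv_graft_inner_getD T.items D0 hndL H0 c ac]
  by_cases hco : T.contains (c, ac) = true
  · rw [PySem.Dict.items_insert_of_contains _ _ hco]
    rw [pv_graft_rep T.items D0 hndL H0 hT c ac (T.getD (c, ac) 0 + w)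
      (by simpa [PySem.Dict.keys] using (PySem.Dict.contains_iff_mem_keys _ _).mp hco)]
    rw [hval]
  · rw [Bool.not_eq_true] at hco
    rw [PySem.Dict.items_insert_of_not_contains _ _ hco]
    have : pvGraft D0 (T.items ++ [((c, ac), T.getD (c, ac) 0 + w)])
        = pvB_graftStep (pvGraft D0 T.items) ((c, ac), T.getD (c, ac) 0 + w) := by
      simp [pvGraft, List.foldl_append]
    rw [this]
    unfold pvB_graftStep
    dsimp only
    rw [hval]

-- main interchange: nested accumulation over triples = flat aggregation then regrouping
theorem pv_main2 (tr : List (Int × Int × Int)) (D0 : PySem.Dict Int (PySem.Dict Int Int))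
    (T : PySem.Dict (Int × Int) Int)
    (hnd : T.keys.Nodup)
    (H0 : ∀ c ac : Int, ((D0.getD c ⟨[]⟩).contains ac) = false)
    (hT : ∀ q ∈ T.items, D0.contains q.1.1 = true)
    (htr : ∀ t ∈ tr, D0.contains t.1 = true) :
    tr.foldl pvNStep (pvGraft D0 T.items) = pvGraft D0 ((tr.foldl pvB_bump T).items) := by
  induction tr generalizing T with
  | nil => rfl
  | cons t tr ih =>
    simp only [List.foldl_cons]
    by_cases hsk : (t.2.1 == t.1) = true
    · rw [show pvNStep (pvGraft D0 T.items) t = pvGraft D0 T.items from by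
        unfold pvNStep; rw [if_pos hsk]]
      rw [show pvB_bump T t = T from by unfold pvB_bump; rw [if_pos hsk]]
      exact ih T hnd hT (fun t' ht' => htr t' (by simp [ht']))
    · rw [show pvNStep (pvGraft D0 T.items) t
          = (pvGraft D0 T.items).insert t.1
              (((pvGraft D0 T.items).getD t.1 ⟨[]⟩).insert t.2.1
                (((pvGraft D0 T.items).getD t.1 ⟨[]⟩).getD t.2.1 0 + t.2.2)) from by
        unfold pvNStep; rw [if_neg hsk]]
      rw [show pvB_bump T t = T.insert (t.1, t.2.1) (T.getD (t.1, t.2.1) 0 + t.2.2) from by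
        unfold pvB_bump; rw [if_neg hsk]]
      rw [← pv_graft_bump D0 T hnd H0 hT t.1 t.2.1 t.2.2]
      apply ih
      · exact PySem.Dict.nodup_keys_insert _ _ _ hnd
      · intro q hq
        rcases (PySem.Dict.mem_items_insert _ _ _ _).mp hq with h1 | h2
        · rw [h1]; exact htr t (by simp)
        · exact hT q h2.1
      · exact fun t' ht' => htr t' (by simp [ht'])

-- every triple's cluster component occurs in mapping_arr
theorem pv_triples_fst_mem (m : List Int) (adj : List (Int × List (Int × Int)))
    (t : Int × Int × Int) (h : t ∈ pvB_triples m adj) : t.1 ∈ m := by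
  unfold pvB_triples at h
  rcases List.mem_flatMap.mp h with ⟨p, hp, ht⟩
  rcases List.mem_map.mp ht with ⟨aw, _, rfl⟩
  have : p.2 ∈ (PySem.List.enumerate m 0).map (·.2) := List.mem_map_of_mem hp
  rwa [pv_enumerate_map_snd] at this

-- ===== VERDICT (by name: the statement is the Claim_ definition above) =====
theorem getClustersAdjHash_spec : Claim_equal_getClustersAdjHash := by
  intro m adj _ _
  unfold Spec_getClustersAdjHash getClustersAdjHash getClustersAdjHash_alt
  rw [pv_main m adj, pv_enumerate_map_snd]
  rw [pv_nodes_eq_triples m adj]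
  rw [pv_base_eq m ⟨[]⟩ (by intro p hp; simp at hp)]
  congr 2
  have hvals := pv_sd_vals_empty m ⟨[]⟩ (by intro p hp; simp at hp)
  have H0 : ∀ c ac : Int,
      (((m.foldl pvB_sd ⟨[]⟩).getD c ⟨[]⟩).contains ac) = false := by
    intro c ac
    rw [pv_getD_empty _ hvals c]
    rfl
  have := pv_main2 (pvB_triples m adj) (m.foldl pvB_sd ⟨[]⟩) ⟨[]⟩
    (by simp [PySem.Dict.keys]) H0
    (by intro q hq; simp at hq)
    (by intro t ht; exact pv_sd_contains m ⟨[]⟩ t.1 (Or.inl (pv_triples_fst_mem m adj t ht)))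
  simpa [pvGraft] using this
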